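-- pv_equiv track=rewrite | github.com/w3ntao/design-of-computer-programs | problem_set_1/jokers_wild.py | replace_joker
-- ===== SOURCE A (Python) =====
-- import itertools
--
-- def replace_joker(hand):
-- 	joker     = [card for card in hand if card in ["?B", "?R"]]
-- 	non_joker = [card for card in hand if card not in joker]
--
-- 	number     = "2 3 4 5 6 7 8 9 T J Q K A".split()
-- 	red_suit   = "D H".split()
-- 	black_suit = "C S".split()
--
-- 	red_card   = [num+suit for num,suit in list(itertools.product(number, red_suit))]
-- 	black_card = [num+suit for num,suit in list(itertools.product(number, black_suit))]
--
-- 	replaced_card = [non_joker]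
--
-- 	for i in range(joker.count("?R")):
-- 		replaced_card = [(lambda x: x[0]+[x[1]])(item) for item in list(itertools.product(replaced_card, red_card))]
--
-- 	for i in range(joker.count("?B")):
-- 		replaced_card = [(lambda x: x[0]+[x[1]])(item) for item in list(itertools.product(replaced_card, black_card))]
--
-- 	return replaced_card
-- ===== SOURCE B (Python) =====
-- import itertools
--
-- def replace_joker(hand):
--     non_joker = [c for c in hand if c not in ("?B", "?R")]
--     number = "2 3 4 5 6 7 8 9 T J Q K A".split()
--     red = [n + s for n in number for s in "DH"]
--     black = [n + s for n in number for s in "CS"]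
--     opts = [red] * hand.count("?R") + [black] * hand.count("?B")
--     return [non_joker + list(combo) for combo in itertools.product(*opts)]
-- ===== Notes on version B (the rewrite author's own statement) =====
-- stated objective: simpler
-- what changed: Replaces the two accumulating cross-product loops (one per joker color) with a single itertools.product over a replicated options list prepended to the non-joker base; the joker-filter intermediate list also disappears.
import Mathlib
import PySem

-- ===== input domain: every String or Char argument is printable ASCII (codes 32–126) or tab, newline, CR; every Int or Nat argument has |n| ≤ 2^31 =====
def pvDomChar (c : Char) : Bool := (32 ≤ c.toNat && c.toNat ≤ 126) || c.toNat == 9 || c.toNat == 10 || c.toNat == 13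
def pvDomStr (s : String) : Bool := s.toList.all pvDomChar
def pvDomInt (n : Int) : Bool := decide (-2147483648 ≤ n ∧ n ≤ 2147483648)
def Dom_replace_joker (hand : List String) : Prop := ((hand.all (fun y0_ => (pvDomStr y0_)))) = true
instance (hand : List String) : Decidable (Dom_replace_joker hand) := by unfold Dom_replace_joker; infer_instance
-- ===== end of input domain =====

-- B replaces A's two accumulating cross-product loops with one product over a replicated options list (objective: simpler).


-- ===== PORT A =====
-- itertools.product of two lists, as A uses it
def pyProd2 {α β : Type} (xs : List α) (ys : List β) : List (α × β) :=
  xs.flatMap (fun x => ys.map (fun y => (x, y)))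

-- A's loop body: [(lambda x: x[0]+[x[1]])(item) for item in list(itertools.product(acc, cards))]
def stepA (cards : List String) (acc : List (List String)) : List (List String) :=
  (pyProd2 acc cards).map (fun x => x.1 ++ [x.2])

def replace_joker (hand : List String) : List (List String) :=
  let joker := hand.filter (fun card => (["?B", "?R"] : List String).contains card)
  let non_joker := hand.filter (fun card => !(joker.contains card))
  let number : List String := ["2","3","4","5","6","7","8","9","T","J","Q","K","A"]
  let red_suit : List String := ["D","H"]
  let black_suit : List String := ["C","S"]
  let red_card := (pyProd2 number red_suit).map (fun p => p.1 ++ p.2)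
  let black_card := (pyProd2 number black_suit).map (fun p => p.1 ++ p.2)
  let replaced_card : List (List String) := [non_joker]
  let replaced_card := (List.range (joker.count "?R")).foldl
    (fun acc _ => stepA red_card acc) replaced_card
  let replaced_card := (List.range (joker.count "?B")).foldl
    (fun acc _ => stepA black_card acc) replaced_card
  replaced_card

-- ===== PORT B =====
-- itertools.product(*opts), tuples as lists (last factor varies fastest)
def prodAll (opts : List (List String)) : List (List String) :=
  match opts with
  | [] => [[]]
  | o :: rest => o.flatMap (fun c => (prodAll rest).map (fun t => c :: t))

def replace_joker_alt (hand : List String) : List (List String) :=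
  let non_joker := hand.filter (fun c => !(c == "?B" || c == "?R"))
  let number : List String := ["2","3","4","5","6","7","8","9","T","J","Q","K","A"]
  let red := number.flatMap (fun n => (['D','H'] : List Char).map (fun s => n.push s))
  let black := number.flatMap (fun n => (['C','S'] : List Char).map (fun s => n.push s))
  let opts := List.replicate (hand.count "?R") red ++ List.replicate (hand.count "?B") black
  (prodAll opts).map (fun combo => non_joker ++ combo)

-- ===== PRECONDITION & SPEC =====
def Spec_replace_joker (hand : List String) (out : List (List String)) : Prop := out = replace_joker_alt hand
instance (hand : List String) (out : List (List String)) : Decidable (Spec_replace_joker hand out) := by unfold Spec_replace_joker; infer_instance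

-- ===== CLAIM (what is proved, stated in full; the proofs are below) =====
def Claim_equal_replace_joker : Prop := ∀ (hand : List String), Dom_replace_joker hand → Spec_replace_joker hand (replace_joker hand)

-- ===== LEMMAS AND PROOFS =====

-- the two 26-card lists are computed differently but are the same literal list
theorem red_eq :
    (pyProd2 (["2","3","4","5","6","7","8","9","T","J","Q","K","A"] : List String) ["D","H"]).map (fun p => p.1 ++ p.2)
      = (["2","3","4","5","6","7","8","9","T","J","Q","K","A"] : List String).flatMap
          (fun n => (['D','H'] : List Char).map (fun s => n.push s)) := by decide

theorem black_eq :
    (pyProd2 (["2","3","4","5","6","7","8","9","T","J","Q","K","A"] : List String) ["C","S"]).map (fun p => p.1 ++ p.2)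
      = (["2","3","4","5","6","7","8","9","T","J","Q","K","A"] : List String).flatMap
          (fun n => (['C','S'] : List Char).map (fun s => n.push s)) := by decide

-- product over concatenated factor lists splits into nested products
theorem prodAll_append (os1 os2 : List (List String)) :
    prodAll (os1 ++ os2) =
      (prodAll os1).flatMap (fun t => (prodAll os2).map (fun u => t ++ u)) := by
  induction os1 with
  | nil => simp [prodAll]
  | cons o rest ih =>
    simp [prodAll, ih, List.flatMap_assoc, List.map_flatMap, List.flatMap_map,
      List.map_map, Function.comp_def]

theorem stepA_eq (cards : List String) (acc : List (List String)) :
    stepA cards acc = acc.flatMap (fun x => cards.map (fun y => x ++ [y])) := by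
  simp [stepA, pyProd2, List.map_flatMap, List.map_map, Function.comp_def]

theorem flatMap_single {α β : Type} (l : List α) (f : α → β) :
    l.flatMap (fun a => [f a]) = l.map f := by
  induction l with
  | nil => rfl
  | cons x xs ih => simp [List.flatMap_cons, ih]

-- n iterations of A's loop = flatMap with the product of n copies of cards
theorem iterA_eq (cards : List String) (n : ℕ) (init : List (List String)) :
    (List.range n).foldl (fun acc _ => stepA cards acc) init =
      init.flatMap (fun x => (prodAll (List.replicate n cards)).map (fun t => x ++ t)) := by
  induction n generalizing init with
  | zero => simp [prodAll]
  | succ m ih =>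
    rw [List.range_succ, List.foldl_append, ih]
    have hrep : List.replicate (m + 1) cards = List.replicate m cards ++ [cards] := by
      simp [List.replicate_succ']
    rw [List.foldl_cons, List.foldl_nil, stepA_eq, hrep, prodAll_append]
    simp [prodAll, List.flatMap_assoc, List.map_flatMap, List.flatMap_map, List.map_map,
      Function.comp_def, List.append_assoc, flatMap_single]

-- counting a joker in the joker sub-list = counting it in the whole hand
theorem count_filter_joker (hand : List String) (a : String)
    (ha : (["?B", "?R"] : List String).contains a = true) :
    (hand.filter (fun card => (["?B", "?R"] : List String).contains card)).count a
      = hand.count a :=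
  List.count_filter ha

-- A's non_joker filter (membership in the joker sub-list) = B's direct filter
theorem nonjoker_eq (hand : List String) :
    hand.filter
        (fun card => !((hand.filter (fun c => (["?B", "?R"] : List String).contains c)).contains card))
      = hand.filter (fun c => !(c == "?B" || c == "?R")) := by
  apply List.filter_congr
  intro x hx
  have hmem : (hand.filter (fun c => (["?B", "?R"] : List String).contains c)).contains x
      = ((["?B", "?R"] : List String).contains x) := by
    cases hb : ((["?B", "?R"] : List String).contains x) with
    | true => exact List.contains_iff_mem.mpr (List.mem_filter.mpr ⟨hx, hb⟩)
    | false =>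
      have hnot : x ∉ hand.filter (fun c => (["?B", "?R"] : List String).contains c) := by
        intro hm
        have := (List.mem_filter.mp hm).2
        rw [hb] at this; exact Bool.false_ne_true this
      exact Bool.eq_false_iff.mpr (fun hc => hnot (List.contains_iff_mem.mp hc))
  rw [hmem]
  by_cases h1 : x = "?B"
  · subst h1; decide
  · by_cases h2 : x = "?R"
    · subst h2; decide
    · simp [h1, h2]

-- ===== VERDICT (by name: the statement is the Claim_ definition above) =====
theorem replace_joker_spec : Claim_equal_replace_joker := by
  intro hand _
  unfold Spec_replace_joker replace_joker replace_joker_alt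
  simp only [red_eq, black_eq, nonjoker_eq,
    count_filter_joker hand "?B" (by decide), count_filter_joker hand "?R" (by decide),
    iterA_eq, prodAll_append]
  simp [List.map_flatMap, List.flatMap_map, List.map_map,
    Function.comp_def, List.append_assoc]
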